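-- pv_equiv track=rewrite | github.com/RegiMuhammar/agent-review-fastrack | ai-agent/app/graph/nodes/bizplan_market_synthesis.py | _split_market_vs_competition
-- ===== SOURCE A (Python) =====
-- COMPETITOR_HINTS = [
--     "competitor",
--     "competitors",
--     "competition",
--     "competitive",
--     "rival",
--     "alternatives",
--     "alternative",
--     "pesaing",
--     "kompetitor",
--     "kompetisi",
-- ]
--
-- MARKET_HINTS = [
--     "market",
--     "pasar",
--     "industry",
--     "industri",
--     "growth",
--     "permintaan",
--     "adoption",
--     "adopsi",
--     "benchmark",
--     "pricing",
-- ]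
--
-- def _split_market_vs_competition(results: list[dict]) -> tuple[list[dict], list[dict]]:
--     market_results: list[dict] = []
--     competition_results: list[dict] = []
--
--     for result in results:
--         role = result.get("reference_role")
--         if role == "competition":
--             competition_results.append(result)
--         if role in {"market", "pricing"}:
--             market_results.append(result)
--
--         haystack = f"{result.get('title', '')} {result.get('snippet', '')}".lower()
--         if any(hint in haystack for hint in COMPETITOR_HINTS):
--             competition_results.append(result)
--         if any(hint in haystack for hint in MARKET_HINTS):
--             market_results.append(result)
--
--     if not market_results:
--         market_results = results[:3]
--
--     deduped_market: list[dict] = []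
--     deduped_competition: list[dict] = []
--     seen_market: set[str] = set()
--     seen_competition: set[str] = set()
--
--     for result in market_results:
--         key = (result.get("url") or result.get("title") or "").lower()
--         if not key or key in seen_market:
--             continue
--         seen_market.add(key)
--         deduped_market.append(result)
--
--     for result in competition_results:
--         key = (result.get("url") or result.get("title") or "").lower()
--         if not key or key in seen_competition:
--             continue
--         seen_competition.add(key)
--         deduped_competition.append(result)
--
--     return deduped_market[:3], deduped_competition[:3]
-- ===== SOURCE B (Python) =====
-- COMPETITOR_HINTS = [
--     "competitor",
--     "competitors",
--     "competition",
--     "competitive",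
--     "rival",
--     "alternatives",
--     "alternative",
--     "pesaing",
--     "kompetitor",
--     "kompetisi",
-- ]
--
-- MARKET_HINTS = [
--     "market",
--     "pasar",
--     "industry",
--     "industri",
--     "growth",
--     "permintaan",
--     "adoption",
--     "adopsi",
--     "benchmark",
--     "pricing",
-- ]
--
--
-- def _key(result):
--     return (result.get("url") or result.get("title") or "").lower()
--
--
-- def _split_market_vs_competition(results: list[dict]) -> tuple[list[dict], list[dict]]:
--     # Single fused pass: classify and deduplicate at once, no intermediate buckets.
--     seen_market: set[str] = set()
--     seen_competition: set[str] = set()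
--     deduped_market: list[dict] = []
--     deduped_competition: list[dict] = []
--     market_qualified = False
--
--     for result in results:
--         role = result.get("reference_role")
--         haystack = f"{result.get('title', '')} {result.get('snippet', '')}".lower()
--
--         if role == "competition" or any(h in haystack for h in COMPETITOR_HINTS):
--             k = _key(result)
--             if k and k not in seen_competition:
--                 seen_competition.add(k)
--                 deduped_competition.append(result)
--
--         if role in ("market", "pricing") or any(h in haystack for h in MARKET_HINTS):
--             market_qualified = True
--             k = _key(result)
--             if k and k not in seen_market:
--                 seen_market.add(k)
--                 deduped_market.append(result)
--
--     if not market_qualified: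
--         # nothing qualified for market: fall back to the first three results
--         for result in results[:3]:
--             k = _key(result)
--             if k and k not in seen_market:
--                 seen_market.add(k)
--                 deduped_market.append(result)
--
--     return deduped_market[:3], deduped_competition[:3]
-- ===== Notes on version B (the rewrite author's own statement) =====
-- stated objective: alternative
-- what changed: A classifies into intermediate market/competition bucket lists (possibly appending a result twice) and then deduplicates each bucket in separate second-phase loops; B is a single fused pass that classifies and deduplicates each result as it is seen, keeping only the seen-key sets, the output lists and a market_qualified flag, with the first-three fallback driven by that flag.
import Mathlib
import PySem

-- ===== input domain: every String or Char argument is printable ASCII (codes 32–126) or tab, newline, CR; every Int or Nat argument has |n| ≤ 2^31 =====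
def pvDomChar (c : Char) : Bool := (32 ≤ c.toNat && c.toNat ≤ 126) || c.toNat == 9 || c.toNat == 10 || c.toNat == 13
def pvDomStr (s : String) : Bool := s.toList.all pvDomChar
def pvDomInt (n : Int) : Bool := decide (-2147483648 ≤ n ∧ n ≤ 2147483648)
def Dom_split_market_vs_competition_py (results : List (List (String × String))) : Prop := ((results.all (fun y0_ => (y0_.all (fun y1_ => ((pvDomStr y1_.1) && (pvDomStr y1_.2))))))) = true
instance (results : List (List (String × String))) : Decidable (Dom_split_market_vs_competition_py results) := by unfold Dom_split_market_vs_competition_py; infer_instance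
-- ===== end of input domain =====

-- B fuses A's two phases (classify into buckets, then dedup each bucket) into one
-- pass that classifies and deduplicates simultaneously; objective: simpler/alternative
-- decomposition (no intermediate bucket lists).

-- Shared module-level constants and leaf expressions of both Pythons
-- (dict.get on a str->str dict = first match in the association list; exact):
def pvGet (r : List (String × String)) (k : String) : Option String :=
  (r.find? (fun p => p.1 == k)).map (·.2)

def pvCompetitorHints : List String :=
  ["competitor", "competitors", "competition", "competitive", "rival",
   "alternatives", "alternative", "pesaing", "kompetitor", "kompetisi"]

def pvMarketHints : List String :=
  ["market", "pasar", "industry", "industri", "growth",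
   "permintaan", "adoption", "adopsi", "benchmark", "pricing"]

-- f"{get('title','')} {get('snippet','')}".lower(), computed on code points (exact on ASCII and beyond)
def pvHay (r : List (String × String)) : List Char :=
  PySem.Chars.lower (((pvGet r "title").getD "").toList ++ ' ' :: ((pvGet r "snippet").getD "").toList)

-- (result.get("url") or result.get("title") or "").lower(): first truthy of the two gets
-- (a missing key gives None, which is falsy exactly like "")
def pvKey (r : List (String × String)) : List Char :=
  let u := ((pvGet r "url").getD "").toList
  let t := ((pvGet r "title").getD "").toList
  PySem.Chars.lower (if u.isEmpty then t else u)

-- the dedup body both Pythons contain verbatim: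
-- 'key = …; if not key or key in seen: continue; seen.add(key); out.append(result)'
def pvAddOnce (st : PySem.Set (List Char) × List (List (String × String)))
    (result : List (String × String)) : PySem.Set (List Char) × List (List (String × String)) :=
  if (pvKey result).isEmpty || PySem.Set.contains st.1 (pvKey result) then st
  else (PySem.Set.add st.1 (pvKey result), st.2 ++ [result])

-- ===== PORT A =====
def split_market_vs_competition_py (results : List (List (String × String))) : (List (List (String × String))) × (List (List (String × String))) :=
  -- phase 1: the two bucket lists
  let buckets := results.foldl
    (fun (st : List (List (String × String)) × List (List (String × String))) result =>
      let role := pvGet result "reference_role"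
      let comp := if role == some "competition" then st.2 ++ [result] else st.2
      let mkt := if role == some "market" || role == some "pricing" then st.1 ++ [result] else st.1
      let hay := pvHay result
      let comp := if pvCompetitorHints.any (fun h => PySem.Chars.isIn h.toList hay) then comp ++ [result] else comp
      let mkt := if pvMarketHints.any (fun h => PySem.Chars.isIn h.toList hay) then mkt ++ [result] else mkt
      (mkt, comp))
    ([], [])
  let market_results := if buckets.1.isEmpty then PySem.List.slice results none (some 3) else buckets.1
  -- phase 2: dedup each bucket by key
  let dm := market_results.foldl pvAddOnce ([], [])
  let dc := buckets.2.foldl pvAddOnce ([], [])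
  (PySem.List.slice dm.2 none (some 3), PySem.List.slice dc.2 none (some 3))

-- ===== PORT B =====
-- B's fused loop state: (market (seen, out), competition (seen, out), market_qualified)
def pvStepB
    (st : (PySem.Set (List Char) × List (List (String × String))) ×
          (PySem.Set (List Char) × List (List (String × String))) × Bool)
    (result : List (String × String)) :
    (PySem.Set (List Char) × List (List (String × String))) ×
    (PySem.Set (List Char) × List (List (String × String))) × Bool :=
  let (m, c, mq) := st
  let role := pvGet result "reference_role"
  let hay := pvHay result
  let c := if role == some "competition" || pvCompetitorHints.any (fun h => PySem.Chars.isIn h.toList hay)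
           then pvAddOnce c result else c
  if role == some "market" || role == some "pricing" || pvMarketHints.any (fun h => PySem.Chars.isIn h.toList hay)
  then (pvAddOnce m result, c, true) else (m, c, mq)

def split_market_vs_competition_py_alt (results : List (List (String × String))) : (List (List (String × String))) × (List (List (String × String))) :=
  let st := results.foldl pvStepB (([], []), ([], []), false)
  let (m, c, mq) := st
  let m := if mq then m else (PySem.List.slice results none (some 3)).foldl pvAddOnce m
  (PySem.List.slice m.2 none (some 3), PySem.List.slice c.2 none (some 3))

-- ===== PRECONDITION & SPEC =====
def Spec_split_market_vs_competition_py (results : List (List (String × String))) (out : (List (List (String × String))) × (List (List (String × String)))) : Prop := out = split_market_vs_competition_py_alt results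
instance (results : List (List (String × String))) (out : (List (List (String × String))) × (List (List (String × String)))) : Decidable (Spec_split_market_vs_competition_py results out) := by unfold Spec_split_market_vs_competition_py; infer_instance

-- ===== CLAIM (what is proved, stated in full; the proofs are below) =====
def Claim_equal_split_market_vs_competition_py : Prop := ∀ (results : List (List (String × String))), Dom_split_market_vs_competition_py results → Spec_split_market_vs_competition_py results (split_market_vs_competition_py results)

-- ===== LEMMAS AND PROOFS =====

-- proof-side abbreviations of the classification tests
def pvQualM (result : List (String × String)) : Bool :=
  pvGet result "reference_role" == some "market" || pvGet result "reference_role" == some "pricing"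
    || pvMarketHints.any (fun h => PySem.Chars.isIn h.toList (pvHay result))

def pvQualC (result : List (String × String)) : Bool :=
  pvGet result "reference_role" == some "competition"
    || pvCompetitorHints.any (fun h => PySem.Chars.isIn h.toList (pvHay result))

-- what one result contributes to A's market / competition bucket
def pvFm (result : List (String × String)) : List (List (String × String)) :=
  (if pvGet result "reference_role" == some "market" || pvGet result "reference_role" == some "pricing"
   then [result] else []) ++
  (if pvMarketHints.any (fun h => PySem.Chars.isIn h.toList (pvHay result)) then [result] else [])

def pvFc (result : List (String × String)) : List (List (String × String)) :=
  (if pvGet result "reference_role" == some "competition" then [result] else []) ++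
  (if pvCompetitorHints.any (fun h => PySem.Chars.isIn h.toList (pvHay result)) then [result] else [])

theorem pvPhase1_eq (l : List (List (String × String)))
    (m c : List (List (String × String))) :
    l.foldl
      (fun (st : List (List (String × String)) × List (List (String × String))) result =>
        let role := pvGet result "reference_role"
        let comp := if role == some "competition" then st.2 ++ [result] else st.2
        let mkt := if role == some "market" || role == some "pricing" then st.1 ++ [result] else st.1
        let hay := pvHay result
        let comp := if pvCompetitorHints.any (fun h => PySem.Chars.isIn h.toList hay) then comp ++ [result] else comp
        let mkt := if pvMarketHints.any (fun h => PySem.Chars.isIn h.toList hay) then mkt ++ [result] else mkt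
        (mkt, comp)) (m, c)
    = (m ++ l.flatMap pvFm, c ++ l.flatMap pvFc) := by
  induction l generalizing m c with
  | nil => simp
  | cons r l ih =>
    simp only [List.foldl_cons, List.flatMap_cons, ih, pvFm, pvFc]
    simp only [Prod.mk.injEq]
    constructor <;> (split_ifs <;> simp)

theorem pvAddOnce_idem (st : PySem.Set (List Char) × List (List (String × String)))
    (r : List (String × String)) : pvAddOnce (pvAddOnce st r) r = pvAddOnce st r := by
  unfold pvAddOnce
  split_ifs with h1 h2
  · rfl
  · rfl
  · exact absurd (by
      simp only [Bool.or_eq_true] at h1 ⊢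
      right
      have hmem : pvKey r ∈ PySem.Set.add st.1 (pvKey r) := by
        simp [PySem.Set.mem_add]
      simp [hmem]) h2

theorem pvDedup_fm (l : List (List (String × String)))
    (st : PySem.Set (List Char) × List (List (String × String))) :
    (l.flatMap pvFm).foldl pvAddOnce st = (l.filter pvQualM).foldl pvAddOnce st := by
  induction l generalizing st with
  | nil => rfl
  | cons r l ih =>
    simp only [List.flatMap_cons, List.foldl_append, List.filter_cons]
    rcases hR : (pvGet r "reference_role" == some "market" || pvGet r "reference_role" == some "pricing") <;>
      rcases hH : pvMarketHints.any (fun h => PySem.Chars.isIn h.toList (pvHay r)) <;>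
        simp [pvFm, pvQualM, hR, hH, ih, pvAddOnce_idem]

theorem pvDedup_fc (l : List (List (String × String)))
    (st : PySem.Set (List Char) × List (List (String × String))) :
    (l.flatMap pvFc).foldl pvAddOnce st = (l.filter pvQualC).foldl pvAddOnce st := by
  induction l generalizing st with
  | nil => rfl
  | cons r l ih =>
    simp only [List.flatMap_cons, List.foldl_append, List.filter_cons]
    rcases hR : (pvGet r "reference_role" == some "competition") <;>
      rcases hH : pvCompetitorHints.any (fun h => PySem.Chars.isIn h.toList (pvHay r)) <;>
        simp [pvFc, pvQualC, hR, hH, ih, pvAddOnce_idem]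

theorem pvFoldB_eq (l : List (List (String × String)))
    (m c : PySem.Set (List Char) × List (List (String × String))) (q : Bool) :
    l.foldl pvStepB (m, c, q)
      = ((l.filter pvQualM).foldl pvAddOnce m,
         (l.filter pvQualC).foldl pvAddOnce c,
         q || l.any pvQualM) := by
  induction l generalizing m c q with
  | nil => simp
  | cons r l ih =>
    simp only [List.foldl_cons, List.filter_cons, List.any_cons, pvStepB]
    rcases hM : pvQualM r <;> rcases hC : pvQualC r <;>
      simp only [pvQualM, Bool.or_assoc] at hM <;> simp only [pvQualC] at hC <;>
        simp [hM, hC, ih, Bool.or_assoc]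

theorem pvFm_eq_nil (r : List (String × String)) :
    pvFm r = [] ↔ pvQualM r = false := by
  rcases h1 : (pvGet r "reference_role" == some "market" || pvGet r "reference_role" == some "pricing") <;>
    rcases h2 : pvMarketHints.any (fun h => PySem.Chars.isIn h.toList (pvHay r)) <;>
      simp [pvFm, pvQualM, h1, h2]

theorem pvFm_empty_iff (l : List (List (String × String))) :
    l.flatMap pvFm = [] ↔ l.any pvQualM = false := by
  rw [List.flatMap_eq_nil_iff, List.any_eq_false]
  constructor
  · intro h r hr
    have hh := h r hr
    rw [pvFm_eq_nil] at hh
    simp [hh]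
  · intro h r hr
    have hh := h r hr
    rw [pvFm_eq_nil]
    simpa using hh

-- ===== VERDICT (by name: the statement is the Claim_ definition above) =====
theorem split_market_vs_competition_py_spec : Claim_equal_split_market_vs_competition_py := by
  intro results _
  unfold Spec_split_market_vs_competition_py
  unfold split_market_vs_competition_py split_market_vs_competition_py_alt
  rw [pvPhase1_eq, pvFoldB_eq]
  simp only [List.nil_append, Bool.false_or]
  by_cases h : results.any pvQualM = true
  · have hne : ¬ (results.flatMap pvFm = []) := by
      rw [pvFm_empty_iff]; simp [h]
    simp only [h, List.isEmpty_iff, hne, if_false, if_true]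
    rw [pvDedup_fm, pvDedup_fc]
  · have hq : results.any pvQualM = false := by simpa using h
    have he : results.flatMap pvFm = [] := (pvFm_empty_iff results).mpr hq
    have hf : results.filter pvQualM = [] := by
      rw [List.filter_eq_nil_iff]
      intro r hr
      have := (List.any_eq_false).mp hq r hr
      simp [this]
    simp only [hq, he, hf, List.isEmpty_nil, if_true, Bool.false_eq_true, if_false,
      List.foldl_nil]
    rw [pvDedup_fc]
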